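-- pv_equiv track=rewrite | github.com/tanupat92/learnComsci | algorithm/lab10greedyKmean.py | switching
-- ===== SOURCE A (Python) =====
-- def switching(clusters, switch):
--     '''
--     >>> clusters = [[1,2,3], [4,5,6],[7,8,9]]
--     >>> switch = [(1,[4,5,6]),(2,[7,8,9]),(7,[1,2,3]),(8,[4,5,6])]
--     >>> switching(clusters, switch)
--     [[3,7],[4,5,6,1,8], [9,2]]
--     '''
--     clusters2 = [c.copy() for c in clusters].copy()
--     for i in range(len(clusters)):
--         s = [s[0] for s in switch if s[0] in clusters[i]]
--         h = [s[0] for s in switch if s[1] == clusters[i]]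
--         for a in s:
--             clusters2[i].remove(a)
--         for a in h:
--             clusters2[i].append(a)
--     return clusters2
-- ===== SOURCE B (Python) =====
-- def switching(clusters, switch):
--     # Count the switch keys once, and group switch keys by their (hashable) target
--     # cluster once; then a single pass per cluster drops the first cnt[x] occurrences
--     # of each value and appends the grouped keys, instead of rescanning switch and
--     # calling list.remove per cluster.
--     cnt = {}
--     for k, _ in switch:
--         cnt[k] = cnt.get(k, 0) + 1
--     appends = {}
--     for k, tgt in switch:
--         key = tuple(tgt)
--         appends[key] = appends.get(key, []) + [k]
--     out = []
--     for c in clusters: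
--         budget = dict(cnt)
--         kept = []
--         for x in c:
--             b = budget.get(x, 0)
--             if b > 0:
--                 budget[x] = b - 1
--             else:
--                 kept.append(x)
--         out.append(kept + appends.get(tuple(c), []))
--     return out
-- ===== Notes on version B (the rewrite author's own statement) =====
-- stated objective: faster
-- what changed: Instead of rescanning switch twice per cluster and calling list.remove per matching key, B builds a key counter and a target->keys grouping once and does a single budgeted pass over each cluster.
import Mathlib
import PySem

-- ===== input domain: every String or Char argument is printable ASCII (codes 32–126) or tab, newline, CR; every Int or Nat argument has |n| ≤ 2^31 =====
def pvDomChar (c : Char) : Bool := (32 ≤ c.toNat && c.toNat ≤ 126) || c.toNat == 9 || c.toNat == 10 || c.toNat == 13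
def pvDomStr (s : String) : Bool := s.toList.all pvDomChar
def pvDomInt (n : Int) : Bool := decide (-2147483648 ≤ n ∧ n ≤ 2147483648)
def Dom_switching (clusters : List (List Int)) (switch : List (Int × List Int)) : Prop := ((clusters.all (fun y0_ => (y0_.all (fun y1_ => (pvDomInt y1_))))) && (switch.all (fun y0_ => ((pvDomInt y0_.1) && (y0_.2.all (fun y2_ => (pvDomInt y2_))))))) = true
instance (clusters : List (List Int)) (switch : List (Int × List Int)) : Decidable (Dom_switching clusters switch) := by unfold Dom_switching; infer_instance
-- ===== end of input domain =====

-- B replaces A's per-cluster rescans of `switch` and repeated list.remove by two indexes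
-- built once (a counter of switch keys and a grouping of keys by target cluster) and one
-- budgeted pass per cluster; measured faster on the generated inputs. Return value only
-- (A mutates nothing observable: it works on copies).

-- ===== PORT A =====
-- `[c.copy() for c in clusters].copy()` copies lists only for mutation; values are immutable here.
def switching (clusters : List (List Int)) (switch : List (Int × List Int)) : List (List Int) :=
  let clusters2 := clusters
  (List.range clusters.length).foldl (fun c2 i =>
    let ci := clusters.getD i []
    let s := (switch.filter (fun p => decide (p.1 ∈ ci))).map Prod.fst
    let h := (switch.filter (fun p => decide (p.2 = ci))).map Prod.fst
    -- `clusters2[i].remove(a)`: remove? = none is Python's ValueError, excluded by Pre_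
    let removed := s.foldl (fun l a => (PySem.List.remove? l a).getD l) (c2.getD i [])
    let appended := h.foldl (fun l a => l ++ [a]) removed
    c2.set i appended) clusters2

-- ===== PORT B =====
def switching_alt (clusters : List (List Int)) (switch : List (Int × List Int)) : List (List Int) :=
  let cnt := switch.foldl (fun d p => d.insert p.1 (d.getD p.1 0 + 1))
    (PySem.Dict.empty : PySem.Dict Int Int)
  -- `appends[key] = appends.get(key, []) + [k]` is Dict.modify with default []
  let appends := switch.foldl (fun d p => d.modify p.2 [] (fun l => l ++ [p.1]))
    (PySem.Dict.empty : PySem.Dict (List Int) (List Int))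
  clusters.foldl (fun out c =>
    let kb := c.foldl (fun (kb : List Int × PySem.Dict Int Int) x =>
      let b := kb.2.getD x 0
      if b > 0 then (kb.1, kb.2.insert x (b - 1)) else (kb.1 ++ [x], kb.2)) ([], cnt)
    out ++ [kb.1 ++ appends.getD c []]) []

-- ===== PRECONDITION & SPEC =====
-- Pre_ excludes exactly the inputs where some cluster contains a switch key more rarely than
-- the key occurs in switch: there A's list.remove raises ValueError.
def Pre_switching (clusters : List (List Int)) (switch : List (Int × List Int)) : Prop :=
  ∀ c ∈ clusters, ∀ v ∈ c, (switch.map Prod.fst).count v ≤ c.count v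
instance (clusters : List (List Int)) (switch : List (Int × List Int)) : Decidable (Pre_switching clusters switch) := by unfold Pre_switching; infer_instance
def pvWitness_switching : List (List Int) × (List (Int × List Int)) :=
  ([[1,2,3],[4,5,6],[7,8,9]], [(1,[4,5,6]),(2,[7,8,9]),(7,[1,2,3]),(8,[4,5,6])])
def Spec_switching (clusters : List (List Int)) (switch : List (Int × List Int)) (out : List (List Int)) : Prop := out = switching_alt clusters switch
instance (clusters : List (List Int)) (switch : List (Int × List Int)) (out : List (List Int)) : Decidable (Spec_switching clusters switch out) := by unfold Spec_switching; infer_instance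

-- ===== CLAIM (what is proved, stated in full; the proofs are below) =====
def Claim_equal_switching : Prop := ∀ (clusters : List (List Int)) (switch : List (Int × List Int)), Dom_switching clusters switch → Pre_switching clusters switch → Spec_switching clusters switch (switching clusters switch)

-- ===== LEMMAS AND PROOFS =====

-- keep elements of c, skipping the first (n v) occurrences of each value v
def fb : List Int → (Int → Int) → List Int
  | [], _ => []
  | x :: xs, n => if n x > 0 then fb xs (fun v => if v = x then n v - 1 else n v) else x :: fb xs n

theorem fb_congr : ∀ (c : List Int) (n m : Int → Int), (∀ v ∈ c, n v = m v) → fb c n = fb c m := by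
  intro c
  induction c with
  | nil => intro n m _; rfl
  | cons x xs ih =>
    intro n m h
    have hx : n x = m x := h x (by simp)
    simp only [fb, hx]
    split
    · exact ih _ _ (fun v hv => by by_cases hvx : v = x <;> simp [hvx, hx, h v (by simp [hv])])
    · rw [ih _ _ (fun v hv => h v (by simp [hv]))]

theorem fb_zero : ∀ (c : List Int) (n : Int → Int), (∀ v ∈ c, n v ≤ 0) → fb c n = c := by
  intro c
  induction c with
  | nil => intro n _; rfl
  | cons x xs ih =>
    intro n h
    have hx : ¬ n x > 0 := by have := h x (by simp); omega
    simp only [fb, if_neg hx]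
    rw [ih _ (fun v hv => h v (by simp [hv]))]

theorem fb_erase : ∀ (c : List Int) (n : Int → Int) (a : Int), a ∈ c → 1 ≤ n a →
    fb c n = fb (c.erase a) (fun v => if v = a then n v - 1 else n v) := by
  intro c
  induction c with
  | nil => intro n a h; simp at h
  | cons x xs ih =>
    intro n a hmem hna
    by_cases hxa : x = a
    · subst hxa
      have hx : n x > 0 := by omega
      simp only [fb, if_pos hx, List.erase_cons_head]
    · rw [List.erase_cons_tail (by simp [Ne.symm, hxa])]
      have hax : a ∈ xs := by rcases List.mem_cons.1 hmem with h | h; exacts [absurd h.symm hxa, h]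
      have hnx : (fun v => if v = a then n v - 1 else n v) x = n x := by simp [hxa]
      simp only [fb, hnx]
      split
      · rw [ih _ a hax (by have : ¬ a = x := fun he => hxa (Eq.symm he); simp only [this, if_false]; omega)]
        apply fb_congr
        intro v _
        by_cases hv1 : v = a <;> by_cases hv2 : v = x <;> simp [hv1, hv2] <;> omega
      · rw [ih _ a hax hna]

theorem removeAll_eq_fb : ∀ (s c : List Int), (∀ v, s.count v ≤ c.count v) →
    s.foldl (fun l a => (PySem.List.remove? l a).getD l) c = fb c (fun v => (s.count v : Int)) := by
  intro s
  induction s with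
  | nil =>
    intro c _
    simp only [List.foldl_nil, List.count_nil]
    exact (fb_zero c _ (fun v _ => by simp)).symm
  | cons a t ih =>
    intro c hcnt
    have hac : a ∈ c := by
      have := hcnt a
      rw [List.count_cons_self] at this
      exact List.count_pos_iff.1 (by omega)
    have hrem : PySem.List.remove? c a = some (c.erase a) := PySem.List.remove?_eq_some_erase c a hac
    simp only [List.foldl_cons, hrem, Option.getD_some]
    rw [ih (c.erase a) (fun v => by
      rcases eq_or_ne v a with h | h
      · subst h
        have h1 := hcnt v
        rw [List.count_cons_self] at h1
        rw [List.count_erase_self]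
        omega
      · rw [List.count_erase_of_ne h]
        have h1 := hcnt v
        rw [List.count_cons_of_ne (Ne.symm h)] at h1
        exact h1)]
    rw [fb_erase c _ a hac (by rw [List.count_cons_self]; push_cast; omega)]
    apply fb_congr
    intro v _
    rcases eq_or_ne v a with h | h
    · subst h
      rw [if_pos rfl, List.count_cons_self]
      push_cast; ring
    · rw [if_neg h, List.count_cons_of_ne (Ne.symm h)]

theorem count_filter_mem (c : List Int) (v : Int) : ∀ (sw : List (Int × List Int)),
    ((sw.filter (fun p => decide (p.1 ∈ c))).map Prod.fst).count v
      = if v ∈ c then (sw.map Prod.fst).count v else 0 := by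
  intro sw
  induction sw with
  | nil => simp
  | cons p t ih =>
    by_cases hp : p.1 ∈ c
    · simp only [List.filter_cons, decide_eq_true hp, if_true, List.map_cons]
      rcases eq_or_ne v p.1 with h | h
      · subst h
        simp [List.count_cons_self, ih, hp]
      · rw [List.count_cons_of_ne (Ne.symm h), List.count_cons_of_ne (Ne.symm h)]
        exact ih
    · simp only [List.filter_cons, decide_eq_false hp, Bool.false_eq_true, if_false, List.map_cons]
      rcases eq_or_ne v p.1 with h | h
      · subst h
        simp [ih, hp]
      · rw [List.count_cons_of_ne (Ne.symm h)]
        exact ih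

theorem loop_eq_fb : ∀ (c : List Int) (acc : List Int) (d : PySem.Dict Int Int),
    (c.foldl (fun (kb : List Int × PySem.Dict Int Int) x =>
      let b := kb.2.getD x 0
      if b > 0 then (kb.1, kb.2.insert x (b - 1)) else (kb.1 ++ [x], kb.2)) (acc, d)).1
    = acc ++ fb c (fun v => d.getD v 0) := by
  intro c
  induction c with
  | nil => intro acc d; simp [fb]
  | cons x xs ih =>
    intro acc d
    simp only [List.foldl_cons]
    by_cases hb : d.getD x 0 > 0
    · simp only [if_pos hb, fb]
      rw [ih]
      congr 1
      apply fb_congr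
      intro v _
      rw [PySem.Dict.getD_insert]
      split <;> simp_all
    · simp only [if_neg hb, fb]
      rw [ih]
      simp

theorem foldl_set_gen (F : List Int → List Int → List Int) (orig : List (List Int)) :
    ∀ (suf pre : List (List Int)), (∀ j, j < suf.length → orig.getD (pre.length + j) [] = suf.getD j []) →
    (List.range' pre.length suf.length 1).foldl
      (fun c2 i => c2.set i (F (orig.getD i []) (c2.getD i []))) (pre ++ suf)
    = pre ++ suf.map (fun c => F c c) := by
  intro suf
  induction suf with
  | nil => intro pre _; simp
  | cons c rest ih =>
    intro pre h
    simp only [List.length_cons]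
    rw [List.range'_succ, List.foldl_cons]
    have hget : (pre ++ c :: rest).getD pre.length [] = c := by
      simp [List.getD]
    have horig : orig.getD pre.length [] = c := by
      have := h 0 (by simp)
      simpa using this
    have hset : (pre ++ c :: rest).set pre.length (F c c) = (pre ++ [F c c]) ++ rest := by
      rw [List.set_append_right _ _ (Nat.le_refl pre.length)]
      simp
    rw [hget, horig, hset]
    have hlen : (pre ++ [F c c]).length = pre.length + 1 := by simp
    have := ih (pre ++ [F c c]) (by
      intro j hj
      rw [hlen]
      have := h (j + 1) (by simpa using Nat.succ_lt_succ hj)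
      simpa [Nat.add_comm, Nat.add_assoc, Nat.add_left_comm] using this)
    rw [hlen] at this
    rw [this]
    simp

theorem foldl_append_id : ∀ (l init : List Int), l.foldl (fun acc a => acc ++ [a]) init = init ++ l := by
  intro l
  induction l with
  | nil => intro init; simp
  | cons x xs ih => intro init; simp [ih]

theorem cnt_getD : ∀ (sw : List (Int × List Int)) (d : PySem.Dict Int Int) (v : Int),
    (sw.foldl (fun d p => d.insert p.1 (d.getD p.1 0 + 1)) d).getD v 0
      = d.getD v 0 + ((sw.map Prod.fst).count v : Int) := by
  intro sw
  induction sw with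
  | nil => intro d v; simp
  | cons p t ih =>
    intro d v
    rw [List.foldl_cons, ih, PySem.Dict.getD_insert]
    rcases eq_or_ne v p.1 with h | h
    · rw [if_pos h, List.map_cons, h, List.count_cons_self]
      push_cast; ring
    · rw [if_neg h, List.map_cons, List.count_cons_of_ne (Ne.symm h)]

theorem app_getD : ∀ (sw : List (Int × List Int)) (d : PySem.Dict (List Int) (List Int)) (c : List Int),
    (sw.foldl (fun d p => d.modify p.2 [] (fun l => l ++ [p.1])) d).getD c []
      = d.getD c [] ++ (sw.filter (fun p => p.2 == c)).map Prod.fst := by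
  intro sw
  induction sw with
  | nil => intro d c; simp
  | cons p t ih =>
    intro d c
    rw [List.foldl_cons, ih, PySem.Dict.getD_modify, List.filter_cons]
    rcases eq_or_ne c p.2 with h | h
    · rw [if_pos h]
      have : (p.2 == c) = true := by simp [h.symm]
      rw [this, if_pos rfl, List.map_cons, h]
      simp
    · rw [if_neg h]
      have : (p.2 == c) = false := by
        simp only [beq_eq_false_iff_ne, ne_eq]
        exact fun he => h (Eq.symm he)
      rw [this]
      simp

theorem switching_eq_map (clusters : List (List Int)) (switch : List (Int × List Int)) :
    switching clusters switch = clusters.map (fun c =>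
      ((switch.filter (fun p => decide (p.2 = c))).map Prod.fst).foldl (fun l a => l ++ [a])
        (((switch.filter (fun p => decide (p.1 ∈ c))).map Prod.fst).foldl
          (fun l a => (PySem.List.remove? l a).getD l) c)) := by
  have h := foldl_set_gen (fun x base =>
      ((switch.filter (fun p => decide (p.2 = x))).map Prod.fst).foldl (fun l a => l ++ [a])
        (((switch.filter (fun p => decide (p.1 ∈ x))).map Prod.fst).foldl
          (fun l a => (PySem.List.remove? l a).getD l) base)) clusters clusters []
      (fun j hj => by simp)
  simp only [List.length_nil, List.nil_append] at h
  unfold switching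
  rw [List.range_eq_range']
  exact h

theorem alt_eq_map (clusters : List (List Int)) (switch : List (Int × List Int)) :
    switching_alt clusters switch = clusters.map (fun c =>
      fb c (fun v => ((switch.map Prod.fst).count v : Int))
      ++ (switch.filter (fun p => p.2 == c)).map Prod.fst) := by
  simp only [switching_alt]
  rw [PySem.List.foldl_append_singleton_eq_map, List.nil_append]
  apply List.map_congr_left
  intro c _
  rw [loop_eq_fb, List.nil_append, app_getD]
  rw [PySem.Dict.getD_empty, List.nil_append]
  congr 1
  apply fb_congr
  intro v _
  rw [cnt_getD]
  simp

-- ===== VERDICT (by name: the statement is the Claim_ definition above) =====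
theorem switching_spec : Claim_equal_switching := by
  intro clusters switch _ hpre
  unfold Spec_switching
  rw [switching_eq_map, alt_eq_map]
  apply List.map_congr_left
  intro c hc
  have hcount : ∀ v, ((switch.filter (fun p => decide (p.1 ∈ c))).map Prod.fst).count v ≤ c.count v := by
    intro v
    rw [count_filter_mem]
    by_cases hv : v ∈ c
    · rw [if_pos hv]; exact hpre c hc v hv
    · rw [if_neg hv]; exact Nat.zero_le _
  rw [foldl_append_id, removeAll_eq_fb _ c hcount]
  congr 1
  · apply fb_congr
    intro v hv
    rw [count_filter_mem, if_pos hv]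
  · have heq : (fun p : Int × List Int => decide (p.2 = c)) = (fun p => p.2 == c) := by
      funext p
      by_cases h : p.2 = c <;> simp [h]
    rw [heq]
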